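-- pv_equiv track=rewrite | github.com/prefix-dev/pixi-build-backends | crates/pixi-build-r/validate_against_feedstocks.py | parse_description
-- ===== SOURCE A (Python) =====
-- def parse_description(content: str) -> dict:
--     """Parse DESCRIPTION file in DCF format."""
--     data = {}
--     current_key = None
--     current_value = ""
--
--     for line in content.split("\n"):
--         if not line:
--             continue
--
--         # Continuation line
--         if line.startswith(" ") or line.startswith("\t"):
--             if current_key:
--                 current_value += " " + line.strip()
--         elif ":" in line:
--             # Save previous
--             if current_key:
--                 data[current_key] = current_value.strip()
--
--             colon_pos = line.index(":")
--             current_key = line[:colon_pos].strip()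
--             current_value = line[colon_pos + 1 :].strip()
--
--     if current_key:
--         data[current_key] = current_value.strip()
--
--     return data
-- ===== SOURCE B (Python) =====
-- def parse_description(content: str) -> dict:
--     """Parse DESCRIPTION file in DCF format (grouped two-pass version)."""
--     # Pass 1: group lines into records: [header_line, frag1, frag2, ...]
--     groups = []
--     for line in content.split("\n"):
--         if not line:
--             continue
--         if line[0] in (" ", "\t"):
--             if groups:
--                 groups[-1].append(line.strip())
--         elif ":" in line:
--             groups.append([line])
--     # Pass 2: reduce each group to a key/value pair
--     data = {}
--     for header, *frags in groups:
--         colon = header.index(":")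
--         key = header[:colon].strip()
--         if key:
--             value = " ".join([header[colon + 1:].strip()] + frags)
--             data[key] = value.strip()
--     return data
-- ===== Notes on version B (the rewrite author's own statement) =====
-- stated objective: alternative
-- what changed: Replaces A's running current_key/current_value accumulator with end-of-loop flush by a two-pass decomposition: first group the lines into explicit records (header plus stripped continuation fragments), then reduce each record to a key/value pair with a single space-join.
import Mathlib
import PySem

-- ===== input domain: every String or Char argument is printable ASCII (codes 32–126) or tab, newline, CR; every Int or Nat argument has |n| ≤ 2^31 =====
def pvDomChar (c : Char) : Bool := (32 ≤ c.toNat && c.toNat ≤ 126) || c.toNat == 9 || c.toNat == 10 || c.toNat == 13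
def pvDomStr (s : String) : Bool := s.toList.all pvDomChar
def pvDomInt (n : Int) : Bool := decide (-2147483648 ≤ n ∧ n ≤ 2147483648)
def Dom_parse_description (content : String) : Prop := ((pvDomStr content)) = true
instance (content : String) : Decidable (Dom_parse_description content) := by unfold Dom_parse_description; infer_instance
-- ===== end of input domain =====

-- B replaces A's running current_key/current_value accumulator by an explicit two-pass
-- decomposition (group lines into records, then reduce each record); objective: alternative.

-- ===== PORT A =====
-- one step of A's `for line in content.split("\n")` loop over the state (data, current_key, current_value)
def pvStepA (st : PySem.Dict String String × Option String × String) (line : String) :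
    PySem.Dict String String × Option String × String :=
  let (data, ck, cv) := st
  if line = "" then st
  else if PySem.Str.startswith line " " || PySem.Str.startswith line "\t" then
    match ck with
    | some k => if k ≠ "" then (data, ck, cv ++ " " ++ PySem.Str.strip line) else st
    | none => st
  else if PySem.Str.isIn ":" line then
    let data' := match ck with
      | some k => if k ≠ "" then data.insert k (PySem.Str.strip cv) else data
      | none => data
    let colon_pos := PySem.Str.find line ":"   -- line.index(":"), guarded by `":" in line`
    (data', some (PySem.Str.strip (PySem.Str.slice line none (some colon_pos))),
            PySem.Str.strip (PySem.Str.slice line (some (colon_pos + 1)) none))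
  else st

def parse_description (content : String) : List (String × String) :=
  let lines := (PySem.Str.split? content "\n").getD []   -- sep "\n" ≠ "", so split? is always `some`
  let st := lines.foldl pvStepA (PySem.Dict.empty, none, "")
  let data := match st.2.1 with
    | some k => if k ≠ "" then st.1.insert k (PySem.Str.strip st.2.2) else st.1
    | none => st.1
  data.items

-- ===== PORT B =====
-- line[0] in (" ", "\t")
def pvIsCont (line : String) : Bool :=
  match PySem.Str.pyGet? line 0 with
  | some c => c = ' ' || c = '\t'
  | none => false

-- pass 1 step: build the list of record groups (header line followed by stripped fragments)
def pvGroupStep (gs : List (List String)) (line : String) : List (List String) :=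
  if line = "" then gs
  else if pvIsCont line then
    match gs.getLast? with
    | some g => gs.dropLast ++ [g ++ [PySem.Str.strip line]]   -- groups[-1].append(line.strip())
    | none => gs
  else if PySem.Str.isIn ":" line then gs ++ [[line]]
  else gs

-- pass 2 step: reduce one group to a key/value assignment
def pvAssign (d : PySem.Dict String String) (g : List String) : PySem.Dict String String :=
  match g with
  | [] => d          -- unreachable: every group is built as header :: frags
  | header :: frags =>
    let colon := PySem.Str.find header ":"
    let key := PySem.Str.strip (PySem.Str.slice header none (some colon))
    if key = "" then d
    else d.insert key
      (PySem.Str.strip (PySem.Str.join " "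
        (PySem.Str.strip (PySem.Str.slice header (some (colon + 1)) none) :: frags)))

def parse_description_alt (content : String) : List (String × String) :=
  let lines := (PySem.Str.split? content "\n").getD []
  let groups := lines.foldl pvGroupStep []
  (groups.foldl pvAssign PySem.Dict.empty).items

-- ===== PRECONDITION & SPEC =====
def Spec_parse_description (content : String) (out : List (String × String)) : Prop := out = parse_description_alt content
instance (content : String) (out : List (String × String)) : Decidable (Spec_parse_description content out) := by unfold Spec_parse_description; infer_instance

-- ===== CLAIM (what is proved, stated in full; the proofs are below) =====
def Claim_equal_parse_description : Prop := ∀ (content : String), Dom_parse_description content → Spec_parse_description content (parse_description content)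

-- ===== LEMMAS AND PROOFS =====

-- the key and the stripped header value a header line yields (both ports compute exactly these)
def pvKeyOf (h : String) : String :=
  PySem.Str.strip (PySem.Str.slice h none (some (PySem.Str.find h ":")))
def pvValOf (h : String) : String :=
  PySem.Str.strip (PySem.Str.slice h (some (PySem.Str.find h ":" + 1)) none)

-- fused one-pass form of B: dict so far + the currently open group
def pvFlush (d : PySem.Dict String String) (o : Option (List String)) : PySem.Dict String String :=
  match o with
  | none => d
  | some g => pvAssign d g

def pvF : List String → PySem.Dict String String → Option (List String) → PySem.Dict String String
  | [], d, o => pvFlush d o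
  | l :: ls, d, o =>
    if l = "" then pvF ls d o
    else if pvIsCont l then pvF ls d (o.map (· ++ [PySem.Str.strip l]))
    else if PySem.Str.isIn ":" l then pvF ls (pvFlush d o) (some [l])
    else pvF ls d o

-- A's final flush of its loop state
def pvFinish (st : PySem.Dict String String × Option String × String) : PySem.Dict String String :=
  match st.2.1 with
  | some k => if k ≠ "" then st.1.insert k (PySem.Str.strip st.2.2) else st.1
  | none => st.1

-- correspondence between A's (current_key, current_value) and B's open group
def pvRel (ck : Option String) (cv : String) (o : Option (List String)) : Prop :=
  match ck, o with
  | none, none => True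
  | some k, some (h :: fr) => k = pvKeyOf h ∧ (k ≠ "" → cv = PySem.Str.join " " (pvValOf h :: fr))
  | _, _ => False

-- string facts specific to the two ports
theorem pvJoinSingle (v : String) : PySem.Str.join " " [v] = v := by
  simp [PySem.Str.join, PySem.Chars.join_singleton, String.ofList_toList]

theorem pvCharsJoinConcat (sep b : List Char) :
    ∀ (l : List (List Char)) (a : List Char),
    PySem.Chars.join sep ((a :: l) ++ [b]) = PySem.Chars.join sep (a :: l) ++ sep ++ b := by
  intro l
  induction l with
  | nil => intro a; simp [PySem.Chars.join_cons_cons, PySem.Chars.join_singleton]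
  | cons q rest ih =>
    intro a
    have := ih q
    simp only [List.cons_append, PySem.Chars.join_cons_cons] at *
    simp [this]

theorem pvJoinConcat (x y : String) (xs : List String) :
    PySem.Str.join " " ((x :: xs) ++ [y]) = PySem.Str.join " " (x :: xs) ++ " " ++ y := by
  rw [← String.toList_inj]
  simp only [PySem.Str.toList_join, String.toList_append, List.map_append, List.map_cons,
    List.map_nil]
  exact pvCharsJoinConcat _ _ (xs.map String.toList) x.toList

theorem pvContIff (l : String) (h : l ≠ "") :
    (PySem.Str.startswith l " " || PySem.Str.startswith l "\t") = pvIsCont l := by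
  have hl : l.toList ≠ [] := by
    intro hn
    exact h (by rw [← String.ofList_toList (s := l), hn])
  obtain ⟨c, cs, hx⟩ : ∃ c cs, l.toList = c :: cs := by
    cases hcs : l.toList with
    | nil => exact absurd hcs hl
    | cons c cs => exact ⟨c, cs, rfl⟩
  have hg : PySem.Str.pyGet? l 0 = some c := by simp [hx]
  simp only [pvIsCont, hg, PySem.Str.startswith_eq, hx]
  rw [show (" " : String).toList = [' '] from rfl, show ("\t" : String).toList = ['\t'] from rfl]
  simp only [PySem.Chars.startswith, List.isPrefixOf, Bool.and_true]
  by_cases h1 : c = ' '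
  · subst h1; simp
  · by_cases h2 : c = '\t'
    · subst h2; simp [h1]
    · have e1 : (' ' == c) = false := beq_eq_false_iff_ne.mpr (fun e => h1 e.symm)
      have e2 : ('\t' == c) = false := beq_eq_false_iff_ne.mpr (fun e => h2 e.symm)
      have e3 : decide (c = ' ') = false := decide_eq_false h1
      have e4 : decide (c = '\t') = false := decide_eq_false h2
      rw [e1, e2, e3, e4]

-- unfolding equations (definitional) for the two step functions and pvF
theorem pvAssign_cons (d : PySem.Dict String String) (hd : String) (fr : List String) :
    pvAssign d (hd :: fr)
      = if pvKeyOf hd = "" then d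
        else d.insert (pvKeyOf hd)
          (PySem.Str.strip (PySem.Str.join " " (pvValOf hd :: fr))) := rfl

theorem pvGroupStep_eq (gs : List (List String)) (l : String) :
    pvGroupStep gs l
      = if l = "" then gs
        else if pvIsCont l then
          match gs.getLast? with
          | some g => gs.dropLast ++ [g ++ [PySem.Str.strip l]]
          | none => gs
        else if PySem.Str.isIn ":" l then gs ++ [[l]]
        else gs := rfl

theorem pvF_cons (l : String) (ls : List String) (d : PySem.Dict String String)
    (o : Option (List String)) :
    pvF (l :: ls) d o
      = if l = "" then pvF ls d o
        else if pvIsCont l then pvF ls d (o.map (· ++ [PySem.Str.strip l]))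
        else if PySem.Str.isIn ":" l then pvF ls (pvFlush d o) (some [l])
        else pvF ls d o := rfl

theorem pvStepA_eq (d : PySem.Dict String String) (ck : Option String) (cv l : String) :
    pvStepA (d, ck, cv) l
      = if l = "" then (d, ck, cv)
        else if PySem.Str.startswith l " " || PySem.Str.startswith l "\t" then
          match ck with
          | some k => if k ≠ "" then (d, ck, cv ++ " " ++ PySem.Str.strip l) else (d, ck, cv)
          | none => (d, ck, cv)
        else if PySem.Str.isIn ":" l then
          (pvFinish (d, ck, cv), some (pvKeyOf l), pvValOf l)
        else (d, ck, cv) := rfl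

theorem pvFoldLast (gs : List (List String)) (d : PySem.Dict String String) :
    gs.foldl pvAssign d = pvFlush (gs.dropLast.foldl pvAssign d) gs.getLast? := by
  rcases List.eq_nil_or_concat gs with rfl | ⟨t, a, rfl⟩
  · simp [pvFlush]
  · simp only [List.concat_eq_append, List.dropLast_concat, List.getLast?_concat,
      List.foldl_append, List.foldl_cons, List.foldl_nil, pvFlush]

-- B's two passes fuse into pvF
theorem pvFusion (ls : List String) (gs : List (List String)) (d : PySem.Dict String String) :
    (ls.foldl pvGroupStep gs).foldl pvAssign d
      = pvF ls (gs.dropLast.foldl pvAssign d) gs.getLast? := by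
  induction ls generalizing gs d with
  | nil => simpa [pvF] using pvFoldLast gs d
  | cons l ls ih =>
    rw [List.foldl_cons, pvGroupStep_eq, pvF_cons]
    by_cases h0 : l = ""
    · rw [if_pos h0, if_pos h0]; exact ih gs d
    rw [if_neg h0, if_neg h0]
    by_cases h1 : pvIsCont l
    · rw [if_pos h1, if_pos h1]
      rcases List.eq_nil_or_concat gs with rfl | ⟨t, a, rfl⟩
      · simpa using ih [] d
      · simp only [List.concat_eq_append, List.getLast?_concat, List.dropLast_concat,
          Option.map_some]
        rw [ih (t ++ [a ++ [PySem.Str.strip l]]) d]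
        simp [List.dropLast_concat, List.getLast?_concat]
    rw [if_neg h1, if_neg h1]
    by_cases h2 : PySem.Str.isIn ":" l
    · rw [if_pos h2, if_pos h2, ih (gs ++ [[l]]) d]
      simp only [List.dropLast_concat, List.getLast?_concat]
      rw [pvFoldLast gs d]
    · rw [if_neg h2, if_neg h2]; exact ih gs d

-- flushing corresponding states agrees
theorem pvFlushRel (d : PySem.Dict String String) (ck : Option String) (cv : String)
    (o : Option (List String)) (h : pvRel ck cv o) : pvFinish (d, ck, cv) = pvFlush d o := by
  cases ck with
  | none =>
    cases o with
    | none => rfl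
    | some g => exact absurd h (by simp [pvRel])
  | some k =>
    cases o with
    | none => exact absurd h (by simp [pvRel])
    | some g =>
      cases g with
      | nil => exact absurd h (by simp [pvRel])
      | cons hd fr =>
        obtain ⟨hk, hv⟩ :
            k = pvKeyOf hd ∧ (k ≠ "" → cv = PySem.Str.join " " (pvValOf hd :: fr)) := h
        show (if k ≠ "" then d.insert k (PySem.Str.strip cv) else d) = pvAssign d (hd :: fr)
        rw [pvAssign_cons, ← hk]
        by_cases hk0 : k = ""
        · rw [if_neg (by simp [hk0]), if_pos hk0]
        · rw [if_pos hk0, if_neg hk0, hv hk0]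

-- A's loop computes pvF
theorem pvAF (ls : List String) (d : PySem.Dict String String) (ck : Option String)
    (cv : String) (o : Option (List String)) (h : pvRel ck cv o) :
    pvFinish (ls.foldl pvStepA (d, ck, cv)) = pvF ls d o := by
  induction ls generalizing d ck cv o with
  | nil => exact pvFlushRel d ck cv o h
  | cons l ls ih =>
    rw [List.foldl_cons, pvStepA_eq, pvF_cons]
    by_cases h0 : l = ""
    · rw [if_pos h0, if_pos h0]; exact ih d ck cv o h
    rw [if_neg h0, if_neg h0]
    by_cases h1 : pvIsCont l
    · rw [if_pos (show (PySem.Str.startswith l " " || PySem.Str.startswith l "\t") = true by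
        rw [pvContIff l h0]; exact h1), if_pos h1]
      cases ck with
      | none =>
        cases o with
        | some g => exact absurd h (by simp [pvRel])
        | none => simpa using ih d none cv none h
      | some k =>
        cases o with
        | none => exact absurd h (by simp [pvRel])
        | some g =>
          cases g with
          | nil => exact absurd h (by simp [pvRel])
          | cons hd fr =>
            obtain ⟨hk, hv⟩ :
                k = pvKeyOf hd ∧ (k ≠ "" → cv = PySem.Str.join " " (pvValOf hd :: fr)) := h
            simp only [Option.map_some]
            by_cases hk0 : k = ""
            · rw [if_neg (by simp [hk0])]
              exact ih d (some k) cv (some (hd :: (fr ++ [PySem.Str.strip l])))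
                ⟨hk, fun hkk => absurd hk0 hkk⟩
            · rw [if_pos hk0]
              refine ih d (some k) (cv ++ " " ++ PySem.Str.strip l)
                (some (hd :: (fr ++ [PySem.Str.strip l]))) ⟨hk, fun _ => ?_⟩
              rw [hv hk0]
              have := pvJoinConcat (pvValOf hd) (PySem.Str.strip l) fr
              simpa using this.symm
    · rw [if_neg (show ¬ (PySem.Str.startswith l " " || PySem.Str.startswith l "\t") = true by
        rw [pvContIff l h0]; exact h1), if_neg h1]
      by_cases h2 : PySem.Str.isIn ":" l
      · rw [if_pos h2, if_pos h2, pvFlushRel d ck cv o h]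
        exact ih _ _ _ (some [l]) ⟨rfl, fun _ => (pvJoinSingle (pvValOf l)).symm⟩
      · rw [if_neg h2, if_neg h2]; exact ih d ck cv o h

-- ===== VERDICT (by name: the statement is the Claim_ definition above) =====
theorem parse_description_spec : Claim_equal_parse_description := by
  intro content _
  have hB := pvFusion ((PySem.Str.split? content "\n").getD []) [] PySem.Dict.empty
  have hA := pvAF ((PySem.Str.split? content "\n").getD []) PySem.Dict.empty none "" none trivial
  simp only [List.dropLast_nil, List.foldl_nil, List.getLast?_nil] at hB
  show (pvFinish (((PySem.Str.split? content "\n").getD []).foldl pvStepA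
      (PySem.Dict.empty, none, ""))).items
    = (((((PySem.Str.split? content "\n").getD []).foldl pvGroupStep []).foldl pvAssign
      PySem.Dict.empty)).items
  rw [hA, hB]
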